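-- pv_equiv track=rewrite | github.com/nelse003/exhaustive_search | Exhaustive_search_depreceated.py | get_altloc_residue_dict
-- ===== SOURCE A (Python) =====
-- def get_altloc_residue_dict(altlocs,occupancy_groups):
--
--     altloc_residue_dict = dict()
--     for altloc in altlocs:
--         altloc_residue_set = set()
--         for occupancy_group in occupancy_groups:
--             for group in occupancy_group:
--                 for residue_altloc in group:
--                     if altloc == residue_altloc.get("altloc"):
--                         altloc_residue_set.add(residue_altloc.get("resseq"))
--                         altloc_residue_dict.update({altloc: altloc_residue_set})
--
--     return altloc_residue_dict
-- ===== SOURCE B (Python) =====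
-- def get_altloc_residue_dict(altlocs, occupancy_groups):
--     # one pass over the structure builds altloc -> ordered set of resseqs,
--     # then a comprehension filters by the requested altlocs
--     index = {}
--     for occupancy_group in occupancy_groups:
--         for group in occupancy_group:
--             for residue_altloc in group:
--                 a = residue_altloc.get("altloc")
--                 if a is not None:
--                     index[a] = index.get(a, set()) | {residue_altloc.get("resseq")}
--     return {a: index[a] for a in altlocs if a in index}
-- ===== Notes on version B (the rewrite author's own statement) =====
-- stated objective: faster
-- what changed: B replaces A's per-altloc rescan of the whole nested structure (altlocs x entries) by a single indexing pass building altloc -> ordered resseq set, then filters the index by altlocs.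
-- outside the precondition, e.g. on get_altloc_residue_dict(['A'], [[[{'altloc': 'A'}]]]): A returns {'A': {None}}, B returns {'A': {None}}
import Mathlib
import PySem

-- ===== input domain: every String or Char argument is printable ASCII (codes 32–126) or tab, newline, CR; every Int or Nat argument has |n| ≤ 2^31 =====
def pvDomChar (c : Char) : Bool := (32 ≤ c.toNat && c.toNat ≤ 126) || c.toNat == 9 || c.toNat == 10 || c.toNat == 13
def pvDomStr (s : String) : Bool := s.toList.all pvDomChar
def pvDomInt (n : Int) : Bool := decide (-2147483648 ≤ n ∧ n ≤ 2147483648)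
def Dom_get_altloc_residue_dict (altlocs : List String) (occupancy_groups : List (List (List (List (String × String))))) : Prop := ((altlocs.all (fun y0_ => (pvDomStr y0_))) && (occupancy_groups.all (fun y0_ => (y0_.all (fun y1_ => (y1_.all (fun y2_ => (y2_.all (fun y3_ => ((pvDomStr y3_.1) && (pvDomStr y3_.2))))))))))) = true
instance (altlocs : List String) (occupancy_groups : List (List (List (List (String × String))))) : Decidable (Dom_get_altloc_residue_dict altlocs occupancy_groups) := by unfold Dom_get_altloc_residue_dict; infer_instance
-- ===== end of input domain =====

-- B replaces A's rescan of the whole structure per altloc by one indexing pass (altloc → set of resseqs)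
-- followed by a filter over altlocs; equivalence of return values is proved on Pre_ (see its comment).

-- ===== PORT A =====
def get_altloc_residue_dict (altlocs : List String) (occupancy_groups : List (List (List (List (String × String))))) : List (String × List String) :=
  (altlocs.foldl
    (fun (altloc_residue_dict : PySem.Dict String (List String)) altloc =>
      (occupancy_groups.foldl
        (fun (st : List String × PySem.Dict String (List String)) occupancy_group =>
          occupancy_group.foldl
            (fun st group =>
              group.foldl
                (fun st residue_altloc =>
                  if (PySem.Dict.mk residue_altloc).get? "altloc" = some altloc then
                    -- under Pre_ the "resseq" key is present, so getD is exact here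
                    let s := PySem.Set.add st.1 ((PySem.Dict.mk residue_altloc).getD "resseq" "")
                    (s, st.2.insert altloc s)
                  else st)
                st)
            st)
        (PySem.Set.empty, altloc_residue_dict)).2)
    PySem.Dict.empty).items

-- ===== PORT B =====
def get_altloc_residue_dict_alt (altlocs : List String) (occupancy_groups : List (List (List (List (String × String))))) : List (String × List String) :=
  let index : PySem.Dict String (List String) :=
    occupancy_groups.foldl
      (fun idx occupancy_group =>
        occupancy_group.foldl
          (fun idx group =>
            group.foldl
              (fun (idx : PySem.Dict String (List String)) residue_altloc =>
                match (PySem.Dict.mk residue_altloc).get? "altloc" with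
                | some a =>
                    -- under Pre_ the "resseq" key is present, so getD is exact here
                    idx.modify a PySem.Set.empty
                      (fun s => PySem.Set.add s ((PySem.Dict.mk residue_altloc).getD "resseq" ""))
                | none => idx)
              idx)
          idx)
      PySem.Dict.empty
  (altlocs.foldl
    (fun (d : PySem.Dict String (List String)) a =>
      if index.contains a then d.insert a (index.getD a PySem.Set.empty) else d)
    PySem.Dict.empty).items

-- ===== PRECONDITION & SPEC =====
-- Pre_ excludes inputs where a residue dict whose "altloc" value occurs in altlocs lacks the
-- "resseq" key: there Python's .get returns None, so A's result holds a set containing None,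
-- which is not a value of the declared List String type (B returns the same set there).
def Pre_get_altloc_residue_dict (altlocs : List String) (occupancy_groups : List (List (List (List (String × String))))) : Prop :=
  ∀ og ∈ occupancy_groups, ∀ g ∈ og, ∀ ra ∈ g, ∀ a ∈ altlocs,
    (PySem.Dict.mk ra).get? "altloc" = some a → ((PySem.Dict.mk ra).get? "resseq").isSome
instance (altlocs : List String) (occupancy_groups : List (List (List (List (String × String))))) : Decidable (Pre_get_altloc_residue_dict altlocs occupancy_groups) := by unfold Pre_get_altloc_residue_dict; infer_instance
def pvWitness_get_altloc_residue_dict : List String × (List (List (List (List (String × String))))) :=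
  (["A", "B"], [[[[("altloc", "A"), ("resseq", "1")], [("altloc", "C"), ("resseq", "2")]]]])

def Spec_get_altloc_residue_dict (altlocs : List String) (occupancy_groups : List (List (List (List (String × String))))) (out : List (String × List String)) : Prop := out = get_altloc_residue_dict_alt altlocs occupancy_groups
instance (altlocs : List String) (occupancy_groups : List (List (List (List (String × String))))) (out : List (String × List String)) : Decidable (Spec_get_altloc_residue_dict altlocs occupancy_groups out) := by unfold Spec_get_altloc_residue_dict; infer_instance

-- ===== CLAIM (what is proved, stated in full; the proofs are below) =====
def Claim_equal_get_altloc_residue_dict : Prop := ∀ (altlocs : List String) (occupancy_groups : List (List (List (List (String × String))))), Dom_get_altloc_residue_dict altlocs occupancy_groups → Pre_get_altloc_residue_dict altlocs occupancy_groups → Spec_get_altloc_residue_dict altlocs occupancy_groups (get_altloc_residue_dict altlocs occupancy_groups)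

-- ===== LEMMAS AND PROOFS =====

-- matched entries and the ordered set of their resseqs, over the flattened entry list
def pvHit (a : String) (ra : List (String × String)) : Bool :=
  (PySem.Dict.mk ra).get? "altloc" == some a

def pvAcc (a : String) (s : List String) (es : List (List (String × String))) : List String :=
  es.foldl
    (fun s ra =>
      if (PySem.Dict.mk ra).get? "altloc" = some a then
        PySem.Set.add s ((PySem.Dict.mk ra).getD "resseq" "")
      else s)
    s

theorem pvAcc_of_no_hit (a : String) (s : List String) (es : List (List (String × String)))
    (h : es.any (pvHit a) = false) : pvAcc a s es = s := by
  induction es generalizing s with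
  | nil => rfl
  | cons ra rest ih =>
    simp only [List.any_cons, Bool.or_eq_false_iff, pvHit, beq_eq_false_iff_ne, ne_eq] at h
    simp only [pvAcc, List.foldl_cons, if_neg h.1]
    exact ih s (by simpa [List.any_eq] using h.2)

-- A's inner triple loop, flattened: it returns the accumulated set, and inserts it iff a hit occurred
theorem pvA_inner (a : String) (es : List (List (String × String))) :
    ∀ st : List String × PySem.Dict String (List String),
    es.foldl
      (fun st ra =>
        if (PySem.Dict.mk ra).get? "altloc" = some a then
          let s' := PySem.Set.add st.1 ((PySem.Dict.mk ra).getD "resseq" "")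
          (s', st.2.insert a s')
        else st)
      st
    = (pvAcc a st.1 es, if es.any (pvHit a) then st.2.insert a (pvAcc a st.1 es) else st.2) := by
  induction es with
  | nil => intro st; rfl
  | cons ra rest ih =>
    intro st
    rw [List.foldl_cons, ih]
    by_cases h : (PySem.Dict.mk ra).get? "altloc" = some a
    · have hh : pvHit a ra = true := by simp [pvHit, h]
      simp only [if_pos h, List.any_cons, hh, Bool.true_or, if_true, pvAcc, List.foldl_cons]
      by_cases hr : rest.any (pvHit a)
      · simp [hr, PySem.Dict.insert_insert_self]
      · simp only [Bool.not_eq_true] at hr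
        have h2 := pvAcc_of_no_hit a
          (PySem.Set.add st.1 ((PySem.Dict.mk ra).getD "resseq" "")) rest hr
        simp only [pvAcc] at h2
        simp [hr, h2]
    · have hh : pvHit a ra = false := by simp [pvHit, h]
      simp only [List.any_cons, hh, Bool.false_or, pvAcc, List.foldl_cons, if_neg h]

-- B's index loop, flattened: lookup in the accumulated index
theorem pvB_getD (es : List (List (String × String))) (idx : PySem.Dict String (List String)) (a : String) :
    (es.foldl
      (fun (idx : PySem.Dict String (List String)) ra =>
        match (PySem.Dict.mk ra).get? "altloc" with
        | some a' => idx.modify a' PySem.Set.empty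
            (fun s => PySem.Set.add s ((PySem.Dict.mk ra).getD "resseq" ""))
        | none => idx)
      idx).getD a PySem.Set.empty
    = pvAcc a (idx.getD a PySem.Set.empty) es := by
  induction es generalizing idx with
  | nil => rfl
  | cons ra rest ih =>
    cases h : (PySem.Dict.mk ra).get? "altloc" with
    | none =>
      simp only [List.foldl_cons, h, ih, pvAcc, List.foldl_cons]
      rw [if_neg (by simp)]
    | some a' =>
      simp only [List.foldl_cons, h, ih, pvAcc, List.foldl_cons]
      by_cases ha : a = a'
      · subst ha
        rw [PySem.Dict.getD_modify, if_pos rfl, if_pos rfl]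
      · rw [PySem.Dict.getD_modify, if_neg ha,
          if_neg (fun e : some a' = some a => ha (Option.some.inj e).symm)]

theorem pvB_contains (es : List (List (String × String))) (idx : PySem.Dict String (List String)) (a : String) :
    (es.foldl
      (fun (idx : PySem.Dict String (List String)) ra =>
        match (PySem.Dict.mk ra).get? "altloc" with
        | some a' => idx.modify a' PySem.Set.empty
            (fun s => PySem.Set.add s ((PySem.Dict.mk ra).getD "resseq" ""))
        | none => idx)
      idx).contains a
    = (idx.contains a || es.any (pvHit a)) := by
  induction es generalizing idx with
  | nil => simp
  | cons ra rest ih =>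
    cases h : (PySem.Dict.mk ra).get? "altloc" with
    | none =>
      simp only [List.foldl_cons, h, ih, List.any_cons]
      have hh : pvHit a ra = false := by simp [pvHit, h]
      simp [hh]
    | some a' =>
      simp only [List.foldl_cons, h, ih, List.any_cons, PySem.Dict.contains_modify]
      have hh : pvHit a ra = (a == a') := by simp [pvHit, h, eq_comm]
      simp [hh, Bool.or_comm, Bool.or_assoc, Bool.or_left_comm]

-- the nested triple loops are the same loops over the flattened entry list
theorem pvA_flat (a : String) (ogs : List (List (List (List (String × String)))))
    (st : List String × PySem.Dict String (List String)) :
    ogs.foldl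
      (fun st og => og.foldl (fun st g => g.foldl
        (fun st ra =>
          if (PySem.Dict.mk ra).get? "altloc" = some a then
            let s' := PySem.Set.add st.1 ((PySem.Dict.mk ra).getD "resseq" "")
            (s', st.2.insert a s')
          else st) st) st)
      st
    = ogs.flatten.flatten.foldl
      (fun st ra =>
        if (PySem.Dict.mk ra).get? "altloc" = some a then
          let s' := PySem.Set.add st.1 ((PySem.Dict.mk ra).getD "resseq" "")
          (s', st.2.insert a s')
        else st)
      st := by
  rw [List.foldl_flatten, List.foldl_flatten]

theorem pvB_flat (ogs : List (List (List (List (String × String)))))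
    (idx : PySem.Dict String (List String)) :
    ogs.foldl
      (fun idx og => og.foldl (fun idx g => g.foldl
        (fun (idx : PySem.Dict String (List String)) ra =>
          match (PySem.Dict.mk ra).get? "altloc" with
          | some a' => idx.modify a' PySem.Set.empty
              (fun s => PySem.Set.add s ((PySem.Dict.mk ra).getD "resseq" ""))
          | none => idx) idx) idx)
      idx
    = ogs.flatten.flatten.foldl
      (fun (idx : PySem.Dict String (List String)) ra =>
        match (PySem.Dict.mk ra).get? "altloc" with
        | some a' => idx.modify a' PySem.Set.empty
            (fun s => PySem.Set.add s ((PySem.Dict.mk ra).getD "resseq" ""))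
        | none => idx)
      idx := by
  rw [List.foldl_flatten, List.foldl_flatten]

-- ===== VERDICT (by name: the statement is the Claim_ definition above) =====
theorem get_altloc_residue_dict_spec : Claim_equal_get_altloc_residue_dict := by
  intro altlocs ogs _ _
  show get_altloc_residue_dict altlocs ogs = get_altloc_residue_dict_alt altlocs ogs
  unfold get_altloc_residue_dict get_altloc_residue_dict_alt
  dsimp only
  congr 1
  apply PySem.List.foldl_congr_mem
  intro d a _
  rw [pvA_flat a ogs (PySem.Set.empty, d), pvA_inner, pvB_flat ogs PySem.Dict.empty,
    pvB_contains ogs.flatten.flatten PySem.Dict.empty a,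
    pvB_getD ogs.flatten.flatten PySem.Dict.empty a]
  simp [PySem.Dict.contains_empty, PySem.Dict.getD_empty]
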